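-- pv_equiv track=rewrite | github.com/MaleeshaSewmini/Hand-Gesture-Recognition-System | hand_gesture_recognition.py | classify_gesture
-- ===== SOURCE A (Python) =====
-- def classify_gesture(up):
--     """
--     Maps a [thumb, index, middle, ring, pinky] boolean list to a gesture name.
--     """
--     t, i, m, r, p = up
--     count = sum(up)
--
--     if count == 0:
--         return "Fist ✊"
--     if count == 5:
--         return "Open Hand ✋"
--     if not t and i and not m and not r and not p:
--         return "Pointing ☝️"
--     if not t and i and m and not r and not p:
--         return "Peace / Victory ✌️"
--     if t and i and not m and not r and not p:
--         return "Gun / L-shape 🤞"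
--     if not t and i and m and r and p:
--         return "Four Fingers"
--     if t and not i and not m and not r and p:
--         return "Shaka / Hang Loose 🤙"
--     if not t and not i and not m and not r and p:
--         return "Pinky Up 🤙"
--     if t and i and m and not r and not p:
--         return "Three Fingers"
--     if not t and i and not m and not r and p:
--         return "Horns 🤘"
--     if t and not i and not m and not r and not p:
--         return "Thumbs Up 👍"
--     if count == 1 and not t:
--         # only non-thumb finger extended
--         for idx, val in enumerate(up[1:], 1):
--             if val:
--                 names = ["Index", "Middle", "Ring", "Pinky"]
--                 return f"{names[idx-1]} Finger"
--     return f"{count} Fingers"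
-- ===== SOURCE B (Python) =====
-- # Full 32-entry lookup table indexed by the 5-bit finger code; runtime is a
-- # single array access with no conditionals and no counting.
-- _NAMES = [f"{bin(code).count('1')} Fingers" for code in range(32)]
-- _NAMES[0b00000] = "Fist \u270a"
-- _NAMES[0b11111] = "Open Hand \u270b"
-- _NAMES[0b01000] = "Pointing \u261d\ufe0f"
-- _NAMES[0b01100] = "Peace / Victory \u270c\ufe0f"
-- _NAMES[0b11000] = "Gun / L-shape \U0001f91e"
-- _NAMES[0b01111] = "Four Fingers"
-- _NAMES[0b10001] = "Shaka / Hang Loose \U0001f919"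
-- _NAMES[0b00001] = "Pinky Up \U0001f919"
-- _NAMES[0b11100] = "Three Fingers"
-- _NAMES[0b01001] = "Horns \U0001f918"
-- _NAMES[0b10000] = "Thumbs Up \U0001f44d"
-- _NAMES[0b00100] = "Middle Finger"
-- _NAMES[0b00010] = "Ring Finger"
--
-- def classify_gesture(up):
--     t, i, m, r, p = up
--     return _NAMES[16 * bool(t) + 8 * bool(i) + 4 * bool(m) + 2 * bool(r) + bool(p)]
-- ===== Notes on version B (the rewrite author's own statement) =====
-- stated objective: alternative
-- what changed: Replaces the runtime if-cascade and the enumerate loop with a complete 32-entry name table built once at import (count-based defaults then named overrides); each call is a single bit-indexed array access with no branching or counting.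
import Mathlib
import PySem

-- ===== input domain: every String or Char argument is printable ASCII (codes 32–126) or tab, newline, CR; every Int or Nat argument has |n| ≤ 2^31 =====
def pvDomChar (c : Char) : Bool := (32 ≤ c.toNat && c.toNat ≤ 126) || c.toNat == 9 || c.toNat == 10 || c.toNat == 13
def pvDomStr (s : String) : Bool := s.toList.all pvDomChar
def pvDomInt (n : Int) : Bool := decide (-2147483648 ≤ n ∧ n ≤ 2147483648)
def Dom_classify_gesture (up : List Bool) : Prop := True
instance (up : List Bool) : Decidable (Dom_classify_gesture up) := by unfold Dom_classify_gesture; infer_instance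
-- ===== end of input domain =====

-- B replaces A's if-cascade and loop with a complete 32-entry table built once
-- (count defaults + named overrides); each call is one bit-indexed access (objective: alternative).

-- ===== PORT A =====
-- the 'for idx, val in enumerate(up[1:], 1)' loop of A, step for step
def classifyLoopA : List (Int × Bool) → Option String
  | [] => none
  | (idx, val) :: rest =>
    if val then
      (PySem.List.pyGet? ["Index", "Middle", "Ring", "Pinky"] (idx - 1)).map (fun n => n ++ " Finger")
    else classifyLoopA rest

def classify_gesture (up : List Bool) : String :=
  match up with
  | [t, i, m, r, p] =>
    let count : Int := up.foldl (fun a b => a + (if b then 1 else 0)) 0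
    if count = 0 then "Fist ✊"
    else if count = 5 then "Open Hand ✋"
    else if !t && i && !m && !r && !p then "Pointing ☝️"
    else if !t && i && m && !r && !p then "Peace / Victory ✌️"
    else if t && i && !m && !r && !p then "Gun / L-shape 🤞"
    else if !t && i && m && r && p then "Four Fingers"
    else if t && !i && !m && !r && p then "Shaka / Hang Loose 🤙"
    else if !t && !i && !m && !r && p then "Pinky Up 🤙"
    else if t && i && m && !r && !p then "Three Fingers"
    else if !t && i && !m && !r && p then "Horns 🤘"
    else if t && !i && !m && !r && !p then "Thumbs Up 👍"
    else if count = 1 ∧ t = false then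
      match classifyLoopA (PySem.List.enumerate (PySem.List.slice up (some 1) none) 1) with
      | some s => s
      | none => PySem.Int.toStr count ++ " Fingers"
    else PySem.Int.toStr count ++ " Fingers"
  | _ => ""   -- length ≠ 5: Python raises ValueError (excluded by Pre_)

-- ===== PORT B =====
-- bin(code).count('1') for 0 ≤ code < 32: count '1' digits of the base-2 rendering (exact there)
def pvPopCount (n : Nat) : Nat := (Nat.toDigits 2 n).count '1'

-- the module-level table of Source B: comprehension over range(32), then index assignments
-- (list assignment at a nonnegative in-range literal index = List.set, exact here)
def pvNames : List String :=
  let base := (PySem.List.pyRange 0 32 1).map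
    (fun code => PySem.Int.toStr (Int.ofNat (pvPopCount code.toNat)) ++ " Fingers")
  ((((((((((((base.set 0 "Fist ✊").set 31 "Open Hand ✋").set 8 "Pointing ☝️").set
      12 "Peace / Victory ✌️").set 24 "Gun / L-shape 🤞").set 15 "Four Fingers").set
      17 "Shaka / Hang Loose 🤙").set 1 "Pinky Up 🤙").set 28 "Three Fingers").set
      9 "Horns 🤘").set 16 "Thumbs Up 👍").set 4 "Middle Finger").set 2 "Ring Finger"

def classify_gesture_alt (up : List Bool) : String :=
  -- unpack 't, i, m, r, p = up' one element at a time (length ≠ 5: Python raises ValueError, excluded by Pre_)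
  match up with
  | [] => ""
  | t :: u1 =>
    match u1 with
    | [] => ""
    | i :: u2 =>
      match u2 with
      | [] => ""
      | m :: u3 =>
        match u3 with
        | [] => ""
        | r :: u4 =>
          match u4 with
          | [] => ""
          | p :: u5 =>
            match u5 with
            | _ :: _ => ""
            | [] =>
              let idx : Int := 16 * (if t then 1 else 0) + 8 * (if i then 1 else 0)
                + 4 * (if m then 1 else 0) + 2 * (if r then 1 else 0) + (if p then 1 else 0)
              ((PySem.List.pyGet? pvNames idx).getD "")   -- idx is always in [0,31], never none

-- ===== PRECONDITION & SPEC =====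
-- Python A unpacks 't, i, m, r, p = up' and so raises ValueError unless len(up) == 5.
def Pre_classify_gesture (up : List Bool) : Prop := up.length = 5
instance (up : List Bool) : Decidable (Pre_classify_gesture up) := by unfold Pre_classify_gesture; infer_instance
def pvWitness_classify_gesture : List Bool := [false, true, true, false, false]

def Spec_classify_gesture (up : List Bool) (out : String) : Prop := out = classify_gesture_alt up
instance (up : List Bool) (out : String) : Decidable (Spec_classify_gesture up out) := by unfold Spec_classify_gesture; infer_instance

-- ===== CLAIM =====
def Claim_equal_classify_gesture : Prop := ∀ (up : List Bool), Dom_classify_gesture up → Pre_classify_gesture up → Spec_classify_gesture up (classify_gesture up)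

-- ===== LEMMAS AND PROOFS =====

-- ===== VERDICT =====
theorem classify_gesture_spec : Claim_equal_classify_gesture := by
  intro up _ hpre
  unfold Spec_classify_gesture
  match up, hpre with
  | [t, i, m, r, p], _ =>
    cases t <;> cases i <;> cases m <;> cases r <;> cases p <;> decide
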